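-- pv_equiv track=rewrite | github.com/jk-jung/problem-solving | codewars/6kyu/6_Update inventory in your smartphone store.py | update_inventory
-- ===== SOURCE A (Python) =====
-- def update_inventory(a, b):
--     a = list(map(list, a))
--     b = list(map(list, b))
--     for x in b:
--         ok = False
--         for y in a:
--             if x[1] == y[1]:
--                 y[0] += x[0]
--                 ok = True
--         if not ok: a.append(x)
--     return sorted([tuple(x) for x in a], key=lambda x: x[1])
-- ===== SOURCE B (Python) =====
-- def update_inventory(a, b):
--     add = {}
--     for q, n in b:
--         add[n] = add.get(n, 0) + q
--     names = {n for _, n in a}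
--     merged = [(q + add.get(n, 0), n) for q, n in a] \
--            + [(q, n) for n, q in add.items() if n not in names]
--     return sorted(merged, key=lambda t: t[1])
-- ===== Notes on version B (the rewrite author's own statement) =====
-- stated objective: faster
-- what changed: Replaces the per-b-item linear scan of a (O(n*m)) with one pass that accumulates b's quantities per name in a dict, then maps over a once and appends the genuinely new names from the dict, before the same stable sort by name.
import Mathlib
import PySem

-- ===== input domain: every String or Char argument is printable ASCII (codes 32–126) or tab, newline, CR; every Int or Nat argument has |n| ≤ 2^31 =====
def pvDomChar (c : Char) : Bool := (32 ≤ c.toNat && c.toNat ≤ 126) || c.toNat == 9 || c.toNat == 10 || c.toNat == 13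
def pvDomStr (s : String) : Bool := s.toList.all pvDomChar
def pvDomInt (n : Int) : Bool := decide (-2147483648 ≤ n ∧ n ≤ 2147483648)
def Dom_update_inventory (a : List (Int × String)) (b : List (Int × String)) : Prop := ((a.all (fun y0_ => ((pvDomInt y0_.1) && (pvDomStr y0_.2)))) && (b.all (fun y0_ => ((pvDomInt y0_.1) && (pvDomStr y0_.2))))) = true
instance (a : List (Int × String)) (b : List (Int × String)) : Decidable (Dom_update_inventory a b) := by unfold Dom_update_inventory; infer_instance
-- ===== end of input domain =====

-- B replaces A's per-b-item linear scan of a by a single dict of accumulated b-quantities; objective: faster (asymptotic).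

-- ===== PORT A =====
-- body of A's 'for x in b' loop: the inner 'for y in a' scan (rebuilding the list with the
-- in-place '+=' updates and the 'ok' flag as fold state), then the conditional append
def uiStep (acc : List (Int × String)) (x : Int × String) : List (Int × String) :=
  let r := acc.foldl
    (fun (p : List (Int × String) × Bool) y =>
      if x.2 == y.2 then (p.1 ++ [(y.1 + x.1, y.2)], true) else (p.1 ++ [y], p.2))
    (([] : List (Int × String)), false)
  if r.2 then r.1 else r.1 ++ [x]

def update_inventory (a : List (Int × String)) (b : List (Int × String)) : List (Int × String) :=
  PySem.List.sorted (b.foldl uiStep a) (fun t => t.2) false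

-- ===== PORT B =====
def update_inventory_alt (a : List (Int × String)) (b : List (Int × String)) : List (Int × String) :=
  let add := b.foldl (fun d (p : Int × String) => d.insert p.2 (d.getD p.2 0 + p.1)) (PySem.Dict.empty : PySem.Dict String Int)
  let names := PySem.Set.ofList (a.map (fun p => p.2))
  let merged := a.map (fun p => (p.1 + add.getD p.2 0, p.2))
      ++ (add.items.filter (fun q => !(PySem.Set.contains names q.1))).map (fun q => (q.2, q.1))
  PySem.List.sorted merged (fun t => t.2) false

-- ===== PRECONDITION & SPEC =====
def Spec_update_inventory (a : List (Int × String)) (b : List (Int × String)) (out : List (Int × String)) : Prop := out = update_inventory_alt a b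
instance (a : List (Int × String)) (b : List (Int × String)) (out : List (Int × String)) : Decidable (Spec_update_inventory a b out) := by unfold Spec_update_inventory; infer_instance

-- ===== CLAIM (what is proved, stated in full; the proofs are below) =====
def Claim_equal_update_inventory : Prop := ∀ (a : List (Int × String)) (b : List (Int × String)), Dom_update_inventory a b → Spec_update_inventory a b (update_inventory a b)

-- ===== LEMMAS AND PROOFS =====

-- total quantity contributed by list bs to the name n
def cnt : List (Int × String) → String → Int
  | [], _ => 0
  | x :: bs, n => (if x.2 = n then x.1 else 0) + cnt bs n

-- first occurrences, in order, of the names in l that are not in seen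
def firstsN : List String → List String → List String
  | _, [] => []
  | seen, c :: l => if c ∈ seen then firstsN seen l else c :: firstsN (seen ++ [c]) l

-- the common normal form of both pre-sort lists
def closedForm (a b : List (Int × String)) : List (Int × String) :=
  a.map (fun y => (y.1 + cnt b y.2, y.2))
    ++ (firstsN (a.map (fun p => p.2)) (b.map (fun p => p.2))).map (fun n => (cnt b n, n))

theorem mem_firstsN_not_seen (l : List String) : ∀ (seen : List String) (n : String), n ∈ firstsN seen l → n ∉ seen := by
  induction l with
  | nil => intro seen n h; simp [firstsN] at h
  | cons c l ih =>
    intro seen n h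
    by_cases hc : c ∈ seen
    · simp only [firstsN, if_pos hc] at h; exact ih seen n h
    · simp only [firstsN, if_neg hc, List.mem_cons] at h
      rcases h with rfl | h
      · exact hc
      · have := ih (seen ++ [c]) n h
        simp only [List.mem_append] at this
        exact fun hn => this (Or.inl hn)

theorem firstsN_congr (l : List String) : ∀ (s t : List String), (∀ n, n ∈ s ↔ n ∈ t) → firstsN s l = firstsN t l := by
  induction l with
  | nil => intro s t _; rfl
  | cons c l ih =>
    intro s t hst
    by_cases hc : c ∈ s
    · simp only [firstsN, if_pos hc, if_pos ((hst c).mp hc)]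
      exact ih s t hst
    · simp only [firstsN, if_neg hc, if_neg (fun h => hc ((hst c).mpr h))]
      refine congrArg _ (ih _ _ ?_)
      intro n; simp only [List.mem_append, hst n]

theorem filter_firstsN (l : List String) : ∀ (seen an : List String),
    (firstsN seen l).filter (fun n => !decide (n ∈ an)) = firstsN (seen ++ an) l := by
  induction l with
  | nil => intro seen an; rfl
  | cons c l ih =>
    intro seen an
    by_cases hc : c ∈ seen
    · simp only [firstsN, if_pos hc, if_pos (by simp [hc] : c ∈ seen ++ an)]
      exact ih seen an
    · by_cases ha : c ∈ an
      · simp only [firstsN, if_neg hc, if_pos (by simp [ha] : c ∈ seen ++ an)]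
        rw [List.filter_cons_of_neg (by simp [ha])]
        rw [ih (seen ++ [c]) an]
        refine firstsN_congr l _ _ (fun n => ?_)
        simp only [List.mem_append, List.mem_singleton]
        constructor
        · rintro ((h | rfl) | h)
          · exact Or.inl h
          · exact Or.inr ha
          · exact Or.inr h
        · rintro (h | h)
          · exact Or.inl (Or.inl h)
          · exact Or.inr h
      · simp only [firstsN, if_neg hc, if_neg (by simp [hc, ha] : ¬ c ∈ seen ++ an)]
        rw [List.filter_cons_of_pos (by simp [ha])]
        rw [ih (seen ++ [c]) an]
        refine congrArg _ (firstsN_congr l _ _ ?_)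
        intro n; simp only [List.mem_append, List.mem_singleton]; tauto

-- Python's set.add loop: fold of Set.add appends exactly the unseen first occurrences
theorem foldl_setadd (l : List String) : ∀ (s : List String),
    l.foldl PySem.Set.add s = s ++ firstsN s l := by
  induction l with
  | nil => intro s; simp [firstsN]
  | cons c l ih =>
    intro s
    by_cases hc : c ∈ s
    · rw [List.foldl_cons]
      have : PySem.Set.add s c = s := by
        simp [PySem.Set.add, PySem.Set.contains, hc]
      rw [this, ih s, firstsN, if_pos hc]
    · rw [List.foldl_cons]
      have : PySem.Set.add s c = s ++ [c] := by
        simp [PySem.Set.add, PySem.Set.contains, hc]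
      rw [this, ih (s ++ [c]), firstsN, if_neg hc]
      simp

-- the weighted-counter fold: lookups are sums over b
theorem getD_weightfold (b : List (Int × String)) : ∀ (d : PySem.Dict String Int) (n : String),
    (b.foldl (fun d (p : Int × String) => d.insert p.2 (d.getD p.2 0 + p.1)) d).getD n 0
      = d.getD n 0 + cnt b n := by
  induction b with
  | nil => intro d n; simp [cnt]
  | cons x bs ih =>
    intro d n
    rw [List.foldl_cons, ih]
    rw [PySem.Dict.getD_insert]
    by_cases h : n = x.2
    · subst h; simp [cnt]; ring
    · rw [if_neg h]
      have hne : ¬ x.2 = n := fun hh => h hh.symm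
      simp [cnt, hne]

-- A's inner 'for y in a' scan, as a closed form of its fold state
theorem inner_scan (x : Int × String) (acc : List (Int × String)) : ∀ (l0 : List (Int × String)) (ok0 : Bool),
    acc.foldl
      (fun (p : List (Int × String) × Bool) y =>
        if x.2 == y.2 then (p.1 ++ [(y.1 + x.1, y.2)], true) else (p.1 ++ [y], p.2))
      (l0, ok0)
    = (l0 ++ acc.map (fun y => if x.2 == y.2 then (y.1 + x.1, y.2) else y),
       ok0 || acc.any (fun y => x.2 == y.2)) := by
  induction acc with
  | nil => intro l0 ok0; simp
  | cons y ys ih =>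
    intro l0 ok0
    rw [List.foldl_cons]
    by_cases h : (x.2 == y.2) = true
    · rw [if_pos h, ih]
      have e : x.2 = y.2 := by simpa using h
      simp [e]
    · rw [if_neg h, ih]
      have e : ¬ x.2 = y.2 := by simpa using h
      simp [e, h]

theorem uiStep_eq (acc : List (Int × String)) (x : Int × String) :
    uiStep acc x = if x.2 ∈ acc.map (fun p => p.2)
      then acc.map (fun y => if x.2 == y.2 then (y.1 + x.1, y.2) else y)
      else acc ++ [x] := by
  unfold uiStep
  rw [inner_scan]
  by_cases h : x.2 ∈ acc.map (fun p => p.2)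
  · have : acc.any (fun y => x.2 == y.2) = true := by
      simp only [List.any_eq_true, beq_iff_eq]
      rcases List.mem_map.mp h with ⟨y, hy, hyx⟩
      exact ⟨y, hy, hyx.symm⟩
    simp [this, h]
  · have hall : acc.any (fun y => x.2 == y.2) = false := by
      simp only [List.any_eq_false, beq_iff_eq]
      intro y hy hxy
      exact h (List.mem_map.mpr ⟨y, hy, hxy.symm⟩)
    have hid : acc.map (fun y => if x.2 = y.2 then (y.1 + x.1, y.2) else y) = acc.map id := by
      apply List.map_congr_left
      intro y hy
      have hxy : ¬ x.2 = y.2 := fun e => h (List.mem_map.mpr ⟨y, hy, e.symm⟩)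
      simp [hxy]
    rw [List.map_id] at hid
    simp [hall, h, hid]

theorem mainA (b : List (Int × String)) : ∀ (a : List (Int × String)),
    b.foldl uiStep a = closedForm a b := by
  induction b with
  | nil => intro a; simp [closedForm, firstsN, cnt]
  | cons x bs ih =>
    intro a
    rw [List.foldl_cons, uiStep_eq]
    by_cases h : x.2 ∈ a.map (fun p => p.2)
    · rw [if_pos h, ih]
      unfold closedForm
      have hsnd : (a.map (fun y => if x.2 == y.2 then (y.1 + x.1, y.2) else y)).map (fun p => p.2)
          = a.map (fun p => p.2) := by
        rw [List.map_map]
        apply List.map_congr_left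
        intro y _
        by_cases e : x.2 = y.2 <;> simp [e]
      rw [hsnd]
      congr 1
      · rw [List.map_map]
        apply List.map_congr_left
        intro y _
        by_cases e : x.2 = y.2
        · simp [Function.comp, e, cnt]; ring
        · simp [Function.comp, e, cnt]
      · rw [List.map_cons]
        rw [show firstsN (a.map fun p => p.2) (x.2 :: bs.map fun p => p.2)
              = firstsN (a.map fun p => p.2) (bs.map fun p => p.2) from by
          simp [firstsN, h]]
        apply List.map_congr_left
        intro n hn
        have hne : ¬ x.2 = n := by
          have := mem_firstsN_not_seen _ _ _ hn
          intro e; exact this (e ▸ h)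
        simp [cnt, hne]
    · rw [if_neg h, ih]
      unfold closedForm
      simp only [List.map_cons, List.map_append, List.map_nil]
      rw [show firstsN (a.map (fun p => p.2)) (x.2 :: bs.map fun p => p.2)
            = x.2 :: firstsN ((a.map fun p => p.2) ++ [x.2]) (bs.map fun p => p.2) from by
        simp [firstsN, h]]
      have h1 : a.map (fun y => (y.1 + cnt bs y.2, y.2)) = a.map (fun y => (y.1 + cnt (x :: bs) y.2, y.2)) := by
        apply List.map_congr_left
        intro y hy
        have hne : ¬ x.2 = y.2 := fun e => h (List.mem_map.mpr ⟨y, hy, e.symm⟩)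
        simp [cnt, hne]
      have h2 : ((x.1 + cnt bs x.2, x.2) : Int × String) = (cnt (x :: bs) x.2, x.2) := by
        simp [cnt]
      have h3 : (firstsN ((a.map fun p => p.2) ++ [x.2]) (bs.map fun p => p.2)).map (fun n => (cnt bs n, n))
          = (firstsN ((a.map fun p => p.2) ++ [x.2]) (bs.map fun p => p.2)).map (fun n => (cnt (x :: bs) n, n)) := by
        apply List.map_congr_left
        intro n hn
        have := mem_firstsN_not_seen _ _ _ hn
        have hne : ¬ x.2 = n := by
          intro e; exact this (by simp [e])
        simp [cnt, hne]
      rw [List.map_cons, h1, h2, h3]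
      simp

theorem mainB (a b : List (Int × String)) :
    update_inventory_alt a b = PySem.List.sorted (closedForm a b) (fun t => t.2) false := by
  unfold update_inventory_alt
  refine congrArg (fun l => PySem.List.sorted l (fun t : Int × String => t.2) false) ?_
  have hW : ∀ n, (b.foldl (fun d (p : Int × String) => d.insert p.2 (d.getD p.2 0 + p.1)) (PySem.Dict.empty : PySem.Dict String Int)).getD n 0 = cnt b n := by
    intro n; rw [getD_weightfold]; simp
  have hnodup : (b.foldl (fun d (p : Int × String) => d.insert p.2 (d.getD p.2 0 + p.1)) (PySem.Dict.empty : PySem.Dict String Int)).keys.Nodup :=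
    PySem.Dict.nodup_keys_foldl_insert_key b (fun p => p.2) (fun d p => d.getD p.2 0 + p.1) _ PySem.Dict.nodup_keys_empty
  have hkeys : (b.foldl (fun d (p : Int × String) => d.insert p.2 (d.getD p.2 0 + p.1)) (PySem.Dict.empty : PySem.Dict String Int)).keys
      = firstsN [] (b.map fun p => p.2) := by
    rw [PySem.Dict.keys_foldl_insert_key]
    rw [PySem.Dict.keys_empty, PySem.Set.update_nil_left, PySem.Set.ofList_eq_foldl, foldl_setadd]
    simp
  have hitems : (b.foldl (fun d (p : Int × String) => d.insert p.2 (d.getD p.2 0 + p.1)) (PySem.Dict.empty : PySem.Dict String Int)).items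
      = (firstsN [] (b.map fun p => p.2)).map (fun k => (k, cnt b k)) := by
    rw [PySem.Dict.items_eq_map_keys _ hnodup 0, hkeys]
    apply List.map_congr_left
    intro k _
    rw [hW]
  rw [hitems]
  unfold closedForm
  congr 1
  · apply List.map_congr_left
    intro p _
    rw [hW]
  · rw [List.filter_map]
    rw [List.map_map]
    have hfil : (firstsN [] (b.map fun p => p.2)).filter
          ((fun q : String × Int => !PySem.Set.contains (PySem.Set.ofList (a.map fun p => p.2)) q.1) ∘ (fun k => (k, cnt b k)))
        = (firstsN [] (b.map fun p => p.2)).filter (fun n => !decide (n ∈ a.map fun p => p.2)) := by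
      apply List.filter_congr
      intro n _
      simp [Function.comp, PySem.Set.contains, PySem.Set.mem_ofList]
    rw [hfil, filter_firstsN, List.nil_append]
    exact List.map_congr_left (fun n _ => rfl)

-- ===== VERDICT (by name: the statement is the Claim_ definition above) =====
theorem update_inventory_spec : Claim_equal_update_inventory := by
  intro a b _
  show update_inventory a b = update_inventory_alt a b
  rw [update_inventory, mainA, mainB]
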